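-- pv_equiv track=rewrite | github.com/Yurchiu/nonebot-plugin-calc-game | nonebot_plugin_calc_game/__init__.py | handleTrans
-- ===== SOURCE A (Python) =====
-- def handleTrans(pos, char="="):
--     outPut = ""
--     length = 20
--
--     while length > 0:
--         length -= 1
--         if length == pos:
--             outPut += char
--         else:
--             outPut += " "
--     return outPut
-- ===== SOURCE B (Python) =====
-- def handleTrans(pos, char="="):
--     # Direct slice assembly: marker at integer position pos in 0..19, else all spaces.
--     if isinstance(pos, int) and 0 <= pos <= 19:
--         return " " * (19 - pos) + char + " " * pos
--     return " " * 20
-- ===== Notes on version B (the rewrite author's own statement) =====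
-- stated objective: simpler
-- what changed: Replaces the 20-iteration countdown loop with a closed-form string assembly: spaces-prefix + marker + spaces-suffix when 0 <= pos <= 19, otherwise 20 spaces.
import Mathlib
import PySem

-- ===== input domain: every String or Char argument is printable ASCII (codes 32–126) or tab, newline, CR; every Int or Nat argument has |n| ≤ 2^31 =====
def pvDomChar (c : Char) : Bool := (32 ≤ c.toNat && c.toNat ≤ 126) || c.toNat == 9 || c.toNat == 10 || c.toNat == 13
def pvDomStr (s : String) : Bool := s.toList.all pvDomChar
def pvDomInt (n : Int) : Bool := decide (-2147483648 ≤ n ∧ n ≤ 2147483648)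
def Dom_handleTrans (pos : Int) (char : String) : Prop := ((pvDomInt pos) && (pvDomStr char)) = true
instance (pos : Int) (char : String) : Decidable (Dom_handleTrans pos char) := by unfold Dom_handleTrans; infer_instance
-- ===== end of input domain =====

-- ===== PORT A =====
-- B replaces A's 20-step countdown loop with closed-form assembly (simpler).
-- Loop of A: while length > 0: length -= 1; outPut += (char if length == pos else " ")
def handleTransLoop (n : Nat) (pos : Int) (char : String) (outPut : String) : String :=
  match n with
  | 0 => outPut
  | Nat.succ m => handleTransLoop m pos char (outPut ++ (if (m : Int) = pos then char else " "))

def handleTrans (pos : Int) (char : String) : String :=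
  handleTransLoop 20 pos char ""

-- ===== PORT B =====
-- " " * n is exactly String.ofList (List.replicate n ' ') for n ≥ 0
def handleTrans_alt (pos : Int) (char : String) : String :=
  if 0 ≤ pos ∧ pos ≤ 19 then
    String.ofList (List.replicate (19 - pos).toNat ' ') ++ char ++ String.ofList (List.replicate pos.toNat ' ')
  else
    String.ofList (List.replicate 20 ' ')

-- ===== PRECONDITION & SPEC =====
def Spec_handleTrans (pos : Int) (char : String) (out : String) : Prop := out = handleTrans_alt pos char
instance (pos : Int) (char : String) (out : String) : Decidable (Spec_handleTrans pos char out) := by unfold Spec_handleTrans; infer_instance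

-- ===== CLAIM (what is proved, stated in full; the proofs are below) =====
def Claim_equal_handleTrans : Prop := ∀ (pos : Int) (char : String), Dom_handleTrans pos char → Spec_handleTrans pos char (handleTrans pos char)

-- ===== LEMMAS AND PROOFS =====

-- spaces n
def pvSpaces (n : Nat) : String := String.ofList (List.replicate n ' ')

theorem pvSpaces_succ (n : Nat) : pvSpaces (n+1) = " " ++ pvSpaces n := by
  apply String.ext; simp [pvSpaces, List.replicate_succ]

theorem loop_out_of_range (n : Nat) (pos : Int) (char out : String)
    (h : pos < 0 ∨ (n : Int) ≤ pos) :
    handleTransLoop n pos char out = out ++ pvSpaces n := by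
  induction n generalizing out with
  | zero => apply String.ext; simp [handleTransLoop, pvSpaces]
  | succ m ih =>
    have hne : (m : Int) ≠ pos := by omega
    rw [handleTransLoop, if_neg hne, ih _ (by omega), pvSpaces_succ]
    rw [String.append_assoc]

theorem loop_in_range (n : Nat) (pos : Int) (char out : String)
    (h0 : 0 ≤ pos) (hn : pos < (n : Int)) :
    handleTransLoop n pos char out
      = out ++ pvSpaces (n - 1 - pos.toNat) ++ char ++ pvSpaces pos.toNat := by
  induction n generalizing out with
  | zero => omega
  | succ m ih =>
    by_cases hp : (m : Int) = pos
    · rw [handleTransLoop, if_pos hp,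
        loop_out_of_range m pos char _ (Or.inr (le_of_eq hp))]
      have h1 : m + 1 - 1 - pos.toNat = 0 := by omega
      have h2 : pos.toNat = m := by omega
      rw [h1, h2]
      apply String.ext; simp [pvSpaces]
    · have hlt : pos < (m : Int) := by omega
      rw [handleTransLoop, if_neg hp, ih _ hlt]
      have h3 : m + 1 - 1 - pos.toNat = (m - 1 - pos.toNat) + 1 := by omega
      rw [h3, pvSpaces_succ]
      apply String.ext; simp

-- ===== VERDICT (by name: the statement is the Claim_ definition above) =====
theorem handleTrans_spec : Claim_equal_handleTrans := by
  intro pos char _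
  unfold Spec_handleTrans handleTrans handleTrans_alt
  by_cases h : 0 ≤ pos ∧ pos ≤ 19
  · rw [if_pos h, loop_in_range 20 pos char "" h.1 (by omega)]
    have h1 : (19 - pos).toNat = 20 - 1 - pos.toNat := by omega
    rw [h1]
    apply String.ext; simp [pvSpaces]
  · rw [if_neg h, loop_out_of_range 20 pos char "" (by omega)]
    apply String.ext; simp [pvSpaces]
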